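-- pv_equiv track=rewrite | github.com/mrjohnsoncomputing/AdventOfCode | 2020/day6.py | get_shared_letters_from_group
-- ===== SOURCE A (Python) =====
-- def get_shared_letters_from_group(array_of_strings):
--     shared_letters = create_letter_array(array_of_strings)
--     # array_of_strings = ["a","b", "c"]
--     # shared_letters = ["a", "b", "c"]
--     letters_to_remove = []
--     for string in array_of_strings:
--         for letter in shared_letters:
--             if letter not in string:
--                 letters_to_remove.append(letter)
--
--     if len(letters_to_remove) > 0:
--         for letter in letters_to_remove:
--             try:
--                 shared_letters.remove(letter)
--             except:
--                 continue
--     return shared_letters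
--
-- def create_letter_array(array_of_strings):
--     letter_array = []
--     for string in array_of_strings:
--         for letter in string:
--             if letter not in letter_array:
--                 letter_array.append(letter)
--     return letter_array
-- ===== SOURCE B (Python) =====
-- def get_shared_letters_from_group(array_of_strings):
--     # first-seen order of letters across the group
--     order = []
--     for string in array_of_strings:
--         for letter in string:
--             if letter not in order:
--                 order.append(letter)
--     # shrink a set intersection instead of collecting letters to remove
--     common = set(order)
--     for string in array_of_strings:
--         common &= set(string)
--     return [letter for letter in order if letter in common]
-- ===== Notes on version B (the rewrite author's own statement) =====
-- stated objective: idiomatic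
-- what changed: Replaces A's collect-letters-to-remove pass followed by a try/except list.remove pass with a shrinking set intersection (common &= set(string)) and an order-preserving final filter over the first-seen order.
import Mathlib
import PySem

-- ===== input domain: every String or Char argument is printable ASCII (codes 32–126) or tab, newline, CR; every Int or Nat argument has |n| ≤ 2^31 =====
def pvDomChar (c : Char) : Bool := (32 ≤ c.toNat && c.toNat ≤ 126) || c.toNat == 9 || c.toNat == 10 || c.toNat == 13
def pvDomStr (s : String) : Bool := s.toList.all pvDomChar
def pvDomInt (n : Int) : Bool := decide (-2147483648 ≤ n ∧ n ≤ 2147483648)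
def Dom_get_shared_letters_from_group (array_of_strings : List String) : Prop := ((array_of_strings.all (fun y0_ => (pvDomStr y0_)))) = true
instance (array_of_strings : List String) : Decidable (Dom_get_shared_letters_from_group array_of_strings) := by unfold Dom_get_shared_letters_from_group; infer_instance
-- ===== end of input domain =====

-- B replaces A's collect-then-remove passes by a shrinking set intersection with an
-- order-preserving final filter (objective: idiomatic; same behaviour, return value only).

-- ===== PORT A =====
-- helper create_letter_array: first-seen order of letters (letters = 1-char strings, ported as Char)
def pvCreateLetterArray (array_of_strings : List String) : List Char :=
  array_of_strings.foldl
    (fun letter_array s =>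
      s.toList.foldl (fun la c => if c ∉ la then la ++ [c] else la) letter_array)
    []

-- 'shared_letters.remove(letter)' inside try/except: ValueError is swallowed (list unchanged)
def pvRemoveOrKeep (sh : List Char) (c : Char) : List Char :=
  match PySem.List.remove? sh c with
  | some l => l
  | none => sh

def get_shared_letters_from_group (array_of_strings : List String) : List String :=
  let shared_letters := pvCreateLetterArray array_of_strings
  let letters_to_remove :=
    array_of_strings.foldl
      (fun acc s => shared_letters.foldl
        (fun acc c => if c ∉ s.toList then acc ++ [c] else acc) acc)
      []
  let shared_letters :=
    if letters_to_remove.length > 0 then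
      letters_to_remove.foldl pvRemoveOrKeep shared_letters
    else shared_letters
  shared_letters.map (fun c => String.ofList [c])

-- ===== PORT B =====
def get_shared_letters_from_group_alt (array_of_strings : List String) : List String :=
  let order :=
    array_of_strings.foldl
      (fun order s => s.toList.foldl (fun la c => if c ∉ la then la ++ [c] else la) order)
      []
  let common :=
    array_of_strings.foldl
      (fun (cm : PySem.Set Char) s => PySem.Set.inter cm (PySem.Set.ofList s.toList))
      (PySem.Set.ofList order)
  (order.filter (fun c => PySem.Set.contains common c)).map (fun c => String.ofList [c])

-- ===== PRECONDITION & SPEC =====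
def Spec_get_shared_letters_from_group (array_of_strings : List String) (out : List String) : Prop := out = get_shared_letters_from_group_alt array_of_strings
instance (array_of_strings : List String) (out : List String) : Decidable (Spec_get_shared_letters_from_group array_of_strings out) := by unfold Spec_get_shared_letters_from_group; infer_instance

-- ===== CLAIM (what is proved, stated in full; the proofs are below) =====
def Claim_equal_get_shared_letters_from_group : Prop := ∀ (array_of_strings : List String), Dom_get_shared_letters_from_group array_of_strings → Spec_get_shared_letters_from_group array_of_strings (get_shared_letters_from_group array_of_strings)

-- ===== LEMMAS AND PROOFS =====

-- the first-seen accumulation is Set.update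
theorem pvInnerFold_eq_update (l : List Char) (acc : List Char) :
    l.foldl (fun la c => if c ∉ la then la ++ [c] else la) acc = PySem.Set.update acc l := by
  induction l generalizing acc with
  | nil => rfl
  | cons x xs ih =>
      simp only [List.foldl_cons, PySem.Set.update_cons, ih]
      congr 1
      rw [PySem.Set.add_eq_ite]
      by_cases h : x ∈ acc <;> simp [h]

theorem pvOrder_eq_aux (xs : List String) : ∀ init : PySem.Set Char,
    xs.foldl (fun acc s => PySem.Set.update acc s.toList) init
      = PySem.Set.update init (xs.flatMap String.toList) := by
  induction xs with
  | nil => intro init; rfl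
  | cons s xs ih =>
      intro init
      simp only [List.foldl_cons, List.flatMap_cons, ih, PySem.Set.update_append]

theorem pvOrder_eq (xs : List String) :
    pvCreateLetterArray xs = PySem.Set.ofList (xs.flatMap String.toList) := by
  unfold pvCreateLetterArray
  rw [PySem.List.foldl_congr_mem' xs _ (fun acc s => PySem.Set.update acc s.toList) []
    (fun s _ acc => pvInnerFold_eq_update s.toList acc)]
  rw [pvOrder_eq_aux]
  exact PySem.Set.update_nil_left _

theorem pvOrder_nodup (xs : List String) : (pvCreateLetterArray xs).Nodup := by
  rw [pvOrder_eq]; exact PySem.Set.nodup_ofList _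

-- A's letters_to_remove as a flatMap of filters
theorem pvRem_eq (xs : List String) (shared : List Char) :
    xs.foldl (fun acc s => shared.foldl
        (fun acc c => if c ∉ s.toList then acc ++ [c] else acc) acc) []
      = xs.flatMap (fun s => shared.filter (fun c => c ∉ s.toList)) := by
  rw [PySem.List.foldl_congr_mem' xs _
    (fun acc s => acc ++ shared.filter (fun c => c ∉ s.toList)) []
    (fun s _ acc => PySem.List.foldl_append_ite_eq_filter _ shared acc)]
  simpa using PySem.List.foldl_append_eq_flatMap
    (fun s => shared.filter (fun c => c ∉ s.toList)) xs []

theorem pvMem_rem (xs : List String) (shared : List Char) (c : Char) :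
    c ∈ xs.flatMap (fun s => shared.filter (fun c => c ∉ s.toList))
      ↔ ∃ s ∈ xs, c ∈ shared ∧ c ∉ s.toList := by
  simp [List.mem_flatMap, List.mem_filter]

-- removing with swallowed ValueError from a nodup list = filter
theorem pvRemoveOrKeep_eq_filter (sh : List Char) (c : Char) (h : sh.Nodup) :
    pvRemoveOrKeep sh c = sh.filter (fun x => x ≠ c) := by
  unfold pvRemoveOrKeep
  by_cases hc : c ∈ sh
  · rw [PySem.List.remove?_eq_some_erase sh c hc]
    rw [List.Nodup.erase_eq_filter h c]
    apply List.filter_congr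
    intro x _
    by_cases hx : x = c <;> simp [hx]
  · rw [(PySem.List.remove?_eq_none_iff sh c).mpr hc]
    rw [List.filter_eq_self.mpr]
    intro x hx
    simp only [ne_eq, decide_eq_true_eq]
    rintro rfl; exact hc hx

theorem pvFoldRemove (rem : List Char) :
    ∀ sh : List Char, sh.Nodup →
      rem.foldl pvRemoveOrKeep sh = sh.filter (fun x => x ∉ rem) := by
  induction rem with
  | nil => intro sh _; simp
  | cons c rem ih =>
      intro sh hnd
      simp only [List.foldl_cons]
      rw [pvRemoveOrKeep_eq_filter sh c hnd, ih _ (hnd.filter _), List.filter_filter]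
      apply List.filter_congr
      intro x _
      simp only [List.mem_cons, decide_not]
      by_cases h1 : x ∈ rem <;> by_cases h2 : x = c <;> simp [h1, h2]

-- B's intersection fold membership
theorem pvMem_common (xs : List String) (c : Char) : ∀ init : PySem.Set Char,
    c ∈ xs.foldl (fun (cm : PySem.Set Char) s => PySem.Set.inter cm (PySem.Set.ofList s.toList)) init
      ↔ c ∈ init ∧ ∀ s ∈ xs, c ∈ s.toList := by
  induction xs with
  | nil => intro init; simp
  | cons s xs ih =>
      intro init
      simp only [List.foldl_cons, ih, PySem.Set.mem_inter, PySem.Set.mem_ofList,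
        List.mem_cons]
      constructor
      · rintro ⟨⟨h1, h2⟩, h3⟩
        refine ⟨h1, ?_⟩
        rintro t (rfl | ht)
        · exact h2
        · exact h3 t ht
      · rintro ⟨h1, h2⟩
        exact ⟨⟨h1, h2 s (Or.inl rfl)⟩, fun t ht => h2 t (Or.inr ht)⟩

-- ===== VERDICT (by name: the statement is the Claim_ definition above) =====
theorem get_shared_letters_from_group_spec : Claim_equal_get_shared_letters_from_group := by
  intro xs _
  unfold Spec_get_shared_letters_from_group
  simp only [get_shared_letters_from_group, get_shared_letters_from_group_alt]
  have horder : xs.foldl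
      (fun order s => s.toList.foldl (fun la c => if c ∉ la then la ++ [c] else la) order) []
      = pvCreateLetterArray xs := rfl
  rw [horder]
  set shared := pvCreateLetterArray xs with hsh
  rw [pvRem_eq]
  set rem := xs.flatMap (fun s => shared.filter (fun c => c ∉ s.toList)) with hrem
  congr 1
  have hA : (if rem.length > 0 then rem.foldl pvRemoveOrKeep shared else shared)
      = shared.filter (fun x => x ∉ rem) := by
    by_cases h : rem.length > 0
    · rw [if_pos h, pvFoldRemove rem shared (pvOrder_nodup xs)]
    · rw [if_neg h]
      have hre : rem = [] := List.length_eq_zero_iff.mp (by omega)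
      simp [hre]
  rw [hA]
  apply List.filter_congr
  intro c hc
  have h1 : (c ∉ rem) ↔ ∀ s ∈ xs, c ∈ s.toList := by
    rw [hrem, pvMem_rem xs shared c]
    constructor
    · intro h s hs
      by_contra hcs
      exact h ⟨s, hs, hc, hcs⟩
    · rintro h ⟨s, hs, _, hcs⟩
      exact hcs (h s hs)
  have h2 : PySem.Set.contains
      (xs.foldl (fun (cm : PySem.Set Char) s => PySem.Set.inter cm (PySem.Set.ofList s.toList))
        (PySem.Set.ofList shared)) c = true
      ↔ ∀ s ∈ xs, c ∈ s.toList := by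
    rw [PySem.Set.contains_iff, pvMem_common]
    simp only [PySem.Set.mem_ofList]
    exact ⟨fun ⟨_, h⟩ => h, fun h => ⟨hc, h⟩⟩
  by_cases hcond : ∀ s ∈ xs, c ∈ s.toList
  · rw [h2.mpr hcond]
    simp [h1.mpr hcond]
  · have hin : c ∈ rem := by
      have := mt h1.mp hcond
      exact not_not.mp this
    have hcf : PySem.Set.contains
        (xs.foldl (fun (cm : PySem.Set Char) s => PySem.Set.inter cm (PySem.Set.ofList s.toList))
          (PySem.Set.ofList shared)) c = false := by
      by_contra hb
      exact hcond (h2.mp (by revert hb; cases (PySem.Set.contains _ c) <;> simp))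
    rw [hcf]
    simp [hin]
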